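-- pv_equiv track=rewrite | github.com/Hurulprasetya/cybersense | preprocessing_utils.py | detect_target
-- ===== SOURCE A (Python) =====
-- def detect_target(text):
--     if not isinstance(text, str):
--         return "tidak_diketahui"
--
--     text = text.lower()
--     self_words = ['gue', 'gua', 'gw', 'aku', 'saya']
--     other_words = ['lo', 'lu', 'loe', 'kamu']
--     tokens = text.split()
--
--     if any(word in tokens for word in self_words):
--         return "diri_sendiri"
--     elif any(word in tokens for word in other_words):
--         return "orang_lain"
--     else:
--         return "tidak_diketahui"
-- ===== SOURCE B (Python) =====
-- def detect_target(text):
--     if not isinstance(text, str):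
--         return "tidak_diketahui"
--     self_set = {'gue', 'gua', 'gw', 'aku', 'saya'}
--     other_set = {'lo', 'lu', 'loe', 'kamu'}
--     has_self = False
--     has_other = False
--     for tok in text.lower().split():
--         if tok in self_set:
--             has_self = True
--         elif tok in other_set:
--             has_other = True
--     if has_self:
--         return "diri_sendiri"
--     if has_other:
--         return "orang_lain"
--     return "tidak_diketahui"
-- ===== Notes on version B (the rewrite author's own statement) =====
-- stated objective: alternative
-- what changed: Replaces A's per-keyword scans of the token list (one membership scan per keyword for both keyword lists) with a single pass over the tokens maintaining two booleans, deciding self-priority after the loop.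
import Mathlib
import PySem

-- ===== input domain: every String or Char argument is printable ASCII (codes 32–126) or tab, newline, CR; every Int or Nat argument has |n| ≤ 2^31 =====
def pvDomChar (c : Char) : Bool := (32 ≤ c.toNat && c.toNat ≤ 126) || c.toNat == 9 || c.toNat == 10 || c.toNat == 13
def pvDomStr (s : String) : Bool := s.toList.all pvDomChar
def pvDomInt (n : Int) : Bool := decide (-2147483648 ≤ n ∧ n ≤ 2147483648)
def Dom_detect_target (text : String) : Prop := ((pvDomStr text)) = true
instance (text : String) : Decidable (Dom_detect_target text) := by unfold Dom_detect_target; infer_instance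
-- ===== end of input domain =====

-- B replaces A's per-keyword scans of the token list with one pass over the tokens
-- maintaining two booleans (objective: alternative decomposition, same result).

-- ===== PORT A =====
def detect_target (text : String) : String :=
  let t := PySem.Str.lower text
  let self_words : List String := ["gue", "gua", "gw", "aku", "saya"]
  let other_words : List String := ["lo", "lu", "loe", "kamu"]
  let tokens := PySem.Str.split₀ t
  if self_words.any (fun word => tokens.contains word) then "diri_sendiri"
  else if other_words.any (fun word => tokens.contains word) then "orang_lain"
  else "tidak_diketahui"

-- ===== PORT B =====
def pvSelfSet : PySem.Set String := PySem.Set.ofList ["gue", "gua", "gw", "aku", "saya"]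
def pvOtherSet : PySem.Set String := PySem.Set.ofList ["lo", "lu", "loe", "kamu"]

def detect_target_alt (text : String) : String :=
  let flags := (PySem.Str.split₀ (PySem.Str.lower text)).foldl
    (fun (p : Bool × Bool) tok =>
      if List.contains pvSelfSet tok then (true, p.2)
      else if List.contains pvOtherSet tok then (p.1, true)
      else p)
    (false, false)
  if flags.1 then "diri_sendiri"
  else if flags.2 then "orang_lain"
  else "tidak_diketahui"

-- ===== PRECONDITION & SPEC =====
def Spec_detect_target (text : String) (out : String) : Prop := out = detect_target_alt text
instance (text : String) (out : String) : Decidable (Spec_detect_target text out) := by unfold Spec_detect_target; infer_instance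

-- ===== CLAIM (what is proved, stated in full; the proofs are below) =====
def Claim_equal_detect_target : Prop := ∀ (text : String), Dom_detect_target text → Spec_detect_target text (detect_target text)

-- ===== LEMMAS AND PROOFS =====

-- The one-pass fold computes exactly "some token is a self word / other word"
-- (for disjoint keyword lists, as here).
theorem pv_fold_flags (S O tokens : List String)
    (hdisj : ∀ x, x ∈ S → x ∉ O) (a b : Bool) :
    tokens.foldl
      (fun (p : Bool × Bool) tok =>
        if S.contains tok then (true, p.2)
        else if O.contains tok then (p.1, true)
        else p)
      (a, b)
    = (a || tokens.any (fun tok => S.contains tok),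
       b || tokens.any (fun tok => O.contains tok)) := by
  induction tokens generalizing a b with
  | nil => simp
  | cons t ts ih =>
    by_cases hs : S.contains t = true
    · have hno : O.contains t = false := by
        have := hdisj t (by simpa using hs)
        simpa using this
      rw [List.foldl_cons, if_pos hs, ih, List.any_cons, List.any_cons, hs, hno]
      simp
    · by_cases ho : O.contains t = true
      · rw [List.foldl_cons, if_neg hs, if_pos ho, ih, List.any_cons, List.any_cons, ho]
        simp only [Bool.not_eq_true] at hs
        rw [hs]
        simp
      · rw [List.foldl_cons, if_neg hs, if_neg ho, ih, List.any_cons, List.any_cons]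
        simp only [Bool.not_eq_true] at hs ho
        rw [hs, ho]
        simp

-- "some keyword occurs among the tokens" = "some token is a keyword".
theorem pv_any_comm (ws tokens : List String) :
    ws.any (fun w => tokens.contains w) = tokens.any (fun t => ws.contains t) := by
  rw [Bool.eq_iff_iff]
  simp only [List.any_eq_true, List.contains_iff_mem]
  tauto

theorem pvSelfSet_eq : pvSelfSet = ["gue", "gua", "gw", "aku", "saya"] := by decide
theorem pvOtherSet_eq : pvOtherSet = ["lo", "lu", "loe", "kamu"] := by decide

theorem detect_target_eq (text : String) :
    detect_target text = detect_target_alt text := by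
  simp only [detect_target, detect_target_alt, pvSelfSet_eq, pvOtherSet_eq]
  rw [pv_fold_flags _ _ _ (by decide)]
  simp only [Bool.false_or]
  rw [pv_any_comm, pv_any_comm (ws := ["lo", "lu", "loe", "kamu"])]

-- ===== VERDICT (by name: the statement is the Claim_ definition above) =====
theorem detect_target_spec : Claim_equal_detect_target := by
  intro text _
  unfold Spec_detect_target
  exact detect_target_eq text
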